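-- pv_equiv track=rewrite | github.com/JODONG2/ALGORITHM | samsung/15685.py | curve
-- ===== SOURCE A (Python) =====
-- dir = [(1,0), (0,-1),(-1,0),(0,1)]
--
-- def curve(dragon,x,y,d,g,dir_list):
--     #TODO: 커브 좌표 찍기
--     if g == -1 :
--         return dragon
--     if not dragon :
--         dragon.append((x,y))
--         x += dir[d][0]
--         y += dir[d][1]
--         dragon.append((x,y))
--         dir_list.append((d+1)%4)
--         return curve(dragon,x,y,d,g-1,dir_list)
--     else :
--         len_dir_list = len(dir_list)
--         for i in range(len_dir_list-1, -1 ,-1):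
--             dragon.append((dragon[-1][0]+dir[dir_list[i]][0], dragon[-1][1]+dir[dir_list[i]][1]))
--             dir_list.append((dir_list[i]+1)%4)
--         return curve(dragon,x,y,d,g-1,dir_list)
-- ===== SOURCE B (Python) =====
-- # B: iterative generation-by-generation rebuild (snapshot of reversed dir_list per
-- # generation, batch extend) instead of A's recursion with in-loop indexing; same
-- # in-place mutation of dragon and dir_list; return-value equivalence is what is proved.
-- DIR = [(1, 0), (0, -1), (-1, 0), (0, 1)]
--
-- def curve(dragon, x, y, d, g, dir_list):
--     if g >= 0 and not dragon:
--         dx, dy = DIR[d]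
--         dragon.append((x, y))
--         dragon.append((x + dx, y + dy))
--         dir_list.append((d + 1) % 4)
--         g -= 1
--     for _ in range(g + 1):
--         moves = dir_list[::-1]
--         px, py = dragon[-1]
--         for m in moves:
--             px += DIR[m][0]
--             py += DIR[m][1]
--             dragon.append((px, py))
--         dir_list += [(m + 1) % 4 for m in moves]
--     return dragon
-- ===== Notes on version B (the rewrite author's own statement) =====
-- stated objective: alternative
-- what changed: Replaces A's recursion with interleaved per-index appends (indexing the growing dir_list inside the loop) by an iterative generation loop that snapshots the reversed direction list once per generation, walks the new points from the current endpoint, and batch-extends both lists.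
-- crash fix: On every input with g < -1 A's recursion never reaches its base case and raises RecursionError; B returns dragon unchanged. — e.g. on curve([(0, 0)], 0, 0, 0, -2, []): A raises RecursionError, B returns [(0, 0)]
import Mathlib
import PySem

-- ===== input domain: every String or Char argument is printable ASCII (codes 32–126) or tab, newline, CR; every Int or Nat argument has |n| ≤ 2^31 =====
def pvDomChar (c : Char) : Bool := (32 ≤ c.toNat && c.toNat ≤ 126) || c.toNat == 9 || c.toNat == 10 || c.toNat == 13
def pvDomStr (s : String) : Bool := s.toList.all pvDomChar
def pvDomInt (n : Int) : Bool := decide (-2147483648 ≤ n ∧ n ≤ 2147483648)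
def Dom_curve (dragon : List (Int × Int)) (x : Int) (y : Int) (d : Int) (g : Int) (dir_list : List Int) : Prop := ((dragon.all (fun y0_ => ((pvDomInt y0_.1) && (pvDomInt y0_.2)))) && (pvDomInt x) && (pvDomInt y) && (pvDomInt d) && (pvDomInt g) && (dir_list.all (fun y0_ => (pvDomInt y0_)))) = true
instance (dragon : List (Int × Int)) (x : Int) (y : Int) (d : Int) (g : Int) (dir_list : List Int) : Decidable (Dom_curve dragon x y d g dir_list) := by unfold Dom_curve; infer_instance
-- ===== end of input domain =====

-- B replaces A's recursion-with-interleaved-appends by an iterative generation loop that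
-- snapshots the reversed direction list and batch-extends (objective: alternative, same cost).
-- Both Pythons mutate dragon and dir_list in place identically; the theorems are about the return value.

-- ===== PORT A =====
def pvDirs : List (Int × Int) := [(1,0), (0,-1), (-1,0), (0,1)]

-- one body of A's inner 'for i in range(len-1,-1,-1)' loop
def curveA_step (st : List (Int × Int) × List Int) (i : Int) : List (Int × Int) × List Int :=
  let last := (PySem.List.pyGet? st.1 (-1)).getD (0, 0)
  let e := (PySem.List.pyGet? st.2 i).getD 0
  let mv := (PySem.List.pyGet? pvDirs e).getD (0, 0)
  (st.1 ++ [(last.1 + mv.1, last.2 + mv.2)], st.2 ++ [PySem.Int.mod (e + 1) 4])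

-- A's recursion; fuel = (g+1).toNat, so fuel 0 is the 'g == -1: return dragon' base case
def curveGo : Nat → List (Int × Int) → Int → Int → Int → Int → List Int → List (Int × Int)
  | 0, dragon, _, _, _, _, _ => dragon
  | fuel+1, dragon, x, y, d, g, dir_list =>
    if dragon.isEmpty then
      let mv := (PySem.List.pyGet? pvDirs d).getD (0, 0)
      let dragon := dragon ++ [(x, y)]
      let x := x + mv.1
      let y := y + mv.2
      let dragon := dragon ++ [(x, y)]
      let dir_list := dir_list ++ [PySem.Int.mod (d + 1) 4]
      curveGo fuel dragon x y d (g - 1) dir_list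
    else
      let st := (PySem.List.pyRange ((dir_list.length : Int) - 1) (-1) (-1)).foldl curveA_step (dragon, dir_list)
      curveGo fuel st.1 x y d (g - 1) st.2

def curve (dragon : List (Int × Int)) (x : Int) (y : Int) (d : Int) (g : Int) (dir_list : List Int) : List (Int × Int) :=
  curveGo (g + 1).toNat dragon x y d g dir_list

-- ===== PORT B =====
-- one generation: snapshot moves = dir_list[::-1], walk from dragon[-1], batch extend
def curveB_gen (dragon : List (Int × Int)) (dir_list : List Int) : List (Int × Int) × List Int :=
  let moves := dir_list.reverse
  let last := (PySem.List.pyGet? dragon (-1)).getD (0, 0)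
  let walk := moves.foldl (fun (acc : List (Int × Int) × Int × Int) m =>
      let mv := (PySem.List.pyGet? pvDirs m).getD (0, 0)
      let px := acc.2.1 + mv.1
      let py := acc.2.2 + mv.2
      (acc.1 ++ [(px, py)], px, py)) ([], last.1, last.2)
  (dragon ++ walk.1, dir_list ++ moves.map (fun m => PySem.Int.mod (m + 1) 4))

def curve_alt (dragon : List (Int × Int)) (x : Int) (y : Int) (d : Int) (g : Int) (dir_list : List Int) : List (Int × Int) :=
  let init :=
    if 0 ≤ g ∧ dragon.isEmpty then
      let mv := (PySem.List.pyGet? pvDirs d).getD (0, 0)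
      (dragon ++ [(x, y), (x + mv.1, y + mv.2)], g - 1, dir_list ++ [PySem.Int.mod (d + 1) 4])
    else (dragon, g, dir_list)
  ((List.range (init.2.1 + 1).toNat).foldl (fun st _ => curveB_gen st.1 st.2) (init.1, init.2.2)).1

-- ===== PRECONDITION & SPEC =====
-- Pre_ excludes exactly the inputs where the Python A raises: g < -1 (unbounded recursion,
-- RecursionError), and the index uses that escape Python's wraparound range [-4,4):
-- d when it is read (dragon empty and g ≥ 0), and dir_list's elements when they are read
-- (g ≥ 1, or g ≥ 0 with dragon nonempty) — IndexError there.
def Pre_curve (dragon : List (Int × Int)) (x : Int) (y : Int) (d : Int) (g : Int) (dir_list : List Int) : Prop :=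
  -1 ≤ g ∧ (dragon = [] → 0 ≤ g → -4 ≤ d ∧ d < 4) ∧
    ((1 ≤ g ∨ (0 ≤ g ∧ dragon ≠ [])) → ∀ e ∈ dir_list, -4 ≤ e ∧ e < 4)
instance (dragon : List (Int × Int)) (x : Int) (y : Int) (d : Int) (g : Int) (dir_list : List Int) : Decidable (Pre_curve dragon x y d g dir_list) := by unfold Pre_curve; infer_instance

def pvWitness_curve : (List (Int × Int)) × Int × Int × Int × Int × List Int := ([], 0, 0, 0, 2, [])

-- A raises RecursionError on every input with g < -1 (the recursion never reaches its base case); B returns dragon unchanged there.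
def Raises_curve (dragon : List (Int × Int)) (x : Int) (y : Int) (d : Int) (g : Int) (dir_list : List Int) : Prop := g < -1
instance (dragon : List (Int × Int)) (x : Int) (y : Int) (d : Int) (g : Int) (dir_list : List Int) : Decidable (Raises_curve dragon x y d g dir_list) := by unfold Raises_curve; infer_instance
def pvRaiseWitness_curve : (List (Int × Int)) × Int × Int × Int × Int × List Int := ([(0, 0)], 0, 0, 0, -2, [])
def pvRaiseWitnessOut_curve : List (Int × Int) := [(0, 0)]

def Spec_curve (dragon : List (Int × Int)) (x : Int) (y : Int) (d : Int) (g : Int) (dir_list : List Int) (out : List (Int × Int)) : Prop := out = curve_alt dragon x y d g dir_list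
instance (dragon : List (Int × Int)) (x : Int) (y : Int) (d : Int) (g : Int) (dir_list : List Int) (out : List (Int × Int)) : Decidable (Spec_curve dragon x y d g dir_list out) := by unfold Spec_curve; infer_instance

-- ===== CLAIM (what is proved, stated in full; the proofs are below) =====
def Claim_equal_curve : Prop := ∀ (dragon : List (Int × Int)) (x : Int) (y : Int) (d : Int) (g : Int) (dir_list : List Int), Dom_curve dragon x y d g dir_list → Pre_curve dragon x y d g dir_list → Spec_curve dragon x y d g dir_list (curve dragon x y d g dir_list)
def Claim_raises_curve : Prop := (∀ (dragon : List (Int × Int)) (x : Int) (y : Int) (d : Int) (g : Int) (dir_list : List Int), Dom_curve dragon x y d g dir_list → Raises_curve dragon x y d g dir_list → ¬ Pre_curve dragon x y d g dir_list) ∧ (Dom_curve (pvRaiseWitness_curve.1) (pvRaiseWitness_curve.2.1) (pvRaiseWitness_curve.2.2.1) (pvRaiseWitness_curve.2.2.2.1) (pvRaiseWitness_curve.2.2.2.2.1) (pvRaiseWitness_curve.2.2.2.2.2) ∧ Raises_curve (pvRaiseWitness_curve.1) (pvRaiseWitness_curve.2.1) (pvRaiseWitness_curve.2.2.1) (pvRaiseWitness_curve.2.2.2.1)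 (pvRaiseWitness_curve.2.2.2.2.1) (pvRaiseWitness_curve.2.2.2.2.2) ∧ curve_alt (pvRaiseWitness_curve.1) (pvRaiseWitness_curve.2.1) (pvRaiseWitness_curve.2.2.1) (pvRaiseWitness_curve.2.2.2.1) (pvRaiseWitness_curve.2.2.2.2.1) (pvRaiseWitness_curve.2.2.2.2.2) = pvRaiseWitnessOut_curve)

-- ===== LEMMAS AND PROOFS =====

-- the points of one walk, with the walker's final position (reference form of B's inner loop)
def walkFrom (px py : Int) : List Int → List (Int × Int) × Int × Int
  | [] => ([], px, py)
  | m :: rest =>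
    let mv := (PySem.List.pyGet? pvDirs m).getD (0, 0)
    let r := walkFrom (px + mv.1) (py + mv.2) rest
    ((px + mv.1, py + mv.2) :: r.1, r.2)

theorem walk_foldl (ms : List Int) : ∀ (acc : List (Int × Int)) (px py : Int),
    ms.foldl (fun (acc : List (Int × Int) × Int × Int) m =>
      let mv := (PySem.List.pyGet? pvDirs m).getD (0, 0)
      let px := acc.2.1 + mv.1
      let py := acc.2.2 + mv.2
      (acc.1 ++ [(px, py)], px, py)) (acc, px, py)
    = (acc ++ (walkFrom px py ms).1, (walkFrom px py ms).2) := by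
  induction ms with
  | nil => intro acc px py; simp [walkFrom]
  | cons m rest ih => intro acc px py; simp [walkFrom, List.foldl_cons, ih]

theorem A_fold (dl0 : List Int) : ∀ (k : Nat) (dlext : List Int) (dragon : List (Int × Int)) (px py : Int),
    k ≤ dl0.length → PySem.List.pyGet? dragon (-1) = some (px, py) →
    (PySem.List.pyRange ((k : Int) - 1) (-1) (-1)).foldl curveA_step (dragon, dl0 ++ dlext)
    = (dragon ++ (walkFrom px py ((dl0.take k).reverse)).1,
       (dl0 ++ dlext) ++ ((dl0.take k).reverse).map (fun e => PySem.Int.mod (e + 1) 4)) := by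
  intro k
  induction k with
  | zero =>
    intro dlext dragon px py _ _
    rw [PySem.List.pyRange_neg_one_eq_nil (by omega)]
    simp [walkFrom]
  | succ k ih =>
    intro dlext dragon px py hk hlast
    have hk' : k < dl0.length := by omega
    rw [show ((k + 1 : Nat) : Int) - 1 = (k : Int) by push_cast; ring,
        PySem.List.pyRange_neg_one_cons (by omega)]
    rw [List.foldl_cons]
    have he : PySem.List.pyGet? (dl0 ++ dlext) ((k : Nat) : Int) = some dl0[k] := by
      rw [PySem.List.pyGet?_natCast]
      rw [List.getElem?_append_left hk']
      simp
    have hstep : curveA_step (dragon, dl0 ++ dlext) (k : Int)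
        = (dragon ++ [(px + ((PySem.List.pyGet? pvDirs dl0[k]).getD (0,0)).1,
                       py + ((PySem.List.pyGet? pvDirs dl0[k]).getD (0,0)).2)],
           dl0 ++ (dlext ++ [PySem.Int.mod (dl0[k] + 1) 4])) := by
      simp [curveA_step, hlast, he]
    rw [hstep]
    rw [ih (dlext ++ [PySem.Int.mod (dl0[k] + 1) 4]) _ _ _ (by omega)
        (PySem.List.pyGet?_neg_one_append_singleton dragon _)]
    have htake : (dl0.take (k + 1)).reverse = dl0[k] :: (dl0.take k).reverse := by
      rw [List.take_add_one]
      simp [List.getElem?_eq_getElem hk']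
    rw [htake]
    simp [walkFrom]

-- A's inner loop over range(len-1,-1,-1) is exactly one B generation when dragon ≠ []
theorem gen_eq (dragon : List (Int × Int)) (dl : List Int) (h : dragon ≠ []) :
    (PySem.List.pyRange ((dl.length : Int) - 1) (-1) (-1)).foldl curveA_step (dragon, dl)
    = curveB_gen dragon dl := by
  have hlast : PySem.List.pyGet? dragon (-1) = some (dragon.getLast h) := by
    simp [pysem]
    exact List.getLast?_eq_some_getLast h
  have := A_fold dl dl.length [] dragon (dragon.getLast h).1 (dragon.getLast h).2 (le_refl _)
    (by rw [hlast])
  simp only [List.append_nil, List.take_length] at this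
  rw [this]
  unfold curveB_gen
  simp only [hlast, Option.getD_some]
  rw [walk_foldl]
  simp

theorem gen_ne_nil (dragon : List (Int × Int)) (dl : List Int) (h : dragon ≠ []) :
    (curveB_gen dragon dl).1 ≠ [] := by
  unfold curveB_gen
  simp [h]

theorem foldl_const_iterate {α β : Type} (f : β → β) (l : List α) : ∀ (s : β),
    l.foldl (fun b _ => f b) s = f^[l.length] s := by
  induction l with
  | nil => intro s; simp
  | cons a l ih => intro s; simp [List.foldl_cons, ih, Function.iterate_succ_apply]

theorem go_eq (fuel : Nat) : ∀ (dragon : List (Int × Int)) (x y d g : Int) (dl : List Int),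
    dragon ≠ [] →
    curveGo fuel dragon x y d g dl
    = ((fun st : List (Int × Int) × List Int => curveB_gen st.1 st.2)^[fuel] (dragon, dl)).1 := by
  induction fuel with
  | zero => intro dragon x y d g dl _; simp [curveGo]
  | succ fuel ih =>
    intro dragon x y d g dl h
    rw [curveGo]
    rw [if_neg (by simpa [List.isEmpty_iff] using h)]
    rw [gen_eq dragon dl h]
    rw [ih _ x y d (g - 1) _ (gen_ne_nil dragon dl h)]
    rw [Function.iterate_succ_apply]

-- ===== VERDICT (by name: the statement is the Claim_ definition above) =====
theorem curve_spec : Claim_equal_curve := by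
  intro dragon x y d g dir_list _ hpre
  unfold Spec_curve curve curve_alt
  match dragon with
  | p :: rest =>
    rw [go_eq _ _ x y d g _ (by simp)]
    simp [foldl_const_iterate]
  | [] =>
    by_cases hg : 0 ≤ g
    · have hfuel : (g + 1).toNat = g.toNat + 1 := by omega
      rw [hfuel]
      simp only [curveGo, List.isEmpty_nil, if_true, List.nil_append]
      rw [go_eq _ _ _ _ d (g - 1) _ (by simp)]
      simp [hg, foldl_const_iterate]
    · have hfuel : (g + 1).toNat = 0 := by omega
      simp [hfuel, curveGo, hg]

theorem curve_raises : Claim_raises_curve := by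
  unfold Claim_raises_curve
  exact ⟨fun dragon x y d g dl _ hr hpre => absurd hpre.1 (by unfold Raises_curve at hr; omega), by decide⟩

-- self-check: the crash-fix claim above is the one proved by curve_raises
theorem pvRaisesClaim_ok : Claim_raises_curve ∧ True := ⟨curve_raises, trivial⟩
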